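-- pv_equiv track=rewrite | github.com/pypi-data/pypi-mirror-249 | packages/keytext/keytext-0.1.tar.gz/keytext-0.1/keytext/__init__.py | neighbourhood_words
-- ===== SOURCE A (Python) =====
-- def neighbourhood_words(keyword, text, left, right):
--     text = text.upper()
--     keyword = keyword.upper()
--     text_pieces = text.split(keyword)
--
--     if len(text_pieces) == 1:
--         return None
--
--     split_words = [piece.split() for piece in text_pieces]
--     occurences = []
--
--     for index in range(len(split_words) - 1):
--         left_words = split_words[index][len(split_words[index]) - left:]
--         right_words = split_words[index + 1][0: right]
--         surrounded_text = " ".join(left_words + [keyword] + right_words)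
--         occurences.append(surrounded_text)
--
--     return occurences
-- ===== SOURCE B (Python) =====
-- def neighbourhood_words(keyword, text, left, right):
--     text = text.upper()
--     keyword = keyword.upper()
--     if not keyword:
--         raise ValueError("empty keyword")
--     i = text.find(keyword)
--     if i == -1:
--         return None
--     occurences = []
--     prev = text[:i]
--     rest = text[i + len(keyword):]
--     while True:
--         j = rest.find(keyword)
--         nxt = rest if j == -1 else rest[:j]
--         left_words = prev.split()
--         left_words = left_words[len(left_words) - left:]
--         right_words = nxt.split()[0:right]
--         occurences.append(" ".join(left_words + [keyword] + right_words))
--         if j == -1: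
--             return occurences
--         prev = nxt
--         rest = rest[j + len(keyword):]
-- ===== Notes on version B (the rewrite author's own statement) =====
-- stated objective: alternative
-- what changed: Replaces A's whole-text split into a piece list with indexed adjacent-pair loop by a single consuming scan: find the next keyword occurrence, slice off the segment before it, and emit each neighbourhood from the previous segment and the newly found one, never materialising the piece list or the per-piece word lists up front.
import Mathlib
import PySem

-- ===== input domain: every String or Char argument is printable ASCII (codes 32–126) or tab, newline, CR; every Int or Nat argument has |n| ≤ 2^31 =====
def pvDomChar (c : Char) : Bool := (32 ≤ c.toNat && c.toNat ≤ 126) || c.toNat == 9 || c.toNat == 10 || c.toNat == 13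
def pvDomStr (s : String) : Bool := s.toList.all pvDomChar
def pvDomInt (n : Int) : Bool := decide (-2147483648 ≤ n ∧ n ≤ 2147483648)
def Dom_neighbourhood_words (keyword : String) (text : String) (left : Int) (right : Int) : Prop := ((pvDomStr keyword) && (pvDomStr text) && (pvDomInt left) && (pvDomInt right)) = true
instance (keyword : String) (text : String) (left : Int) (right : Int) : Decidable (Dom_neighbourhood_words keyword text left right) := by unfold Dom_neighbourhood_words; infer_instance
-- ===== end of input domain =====

-- B replaces A's split-into-pieces-then-index-adjacent-pairs loop by a single consuming
-- find/slice scan over the text (objective: alternative decomposition, same cost).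

-- ===== PORT A =====
def neighbourhood_words (keyword : String) (text : String) (left : Int) (right : Int) : Option (List String) :=
  let textU := PySem.Str.upper text
  let keyU := PySem.Str.upper keyword
  match PySem.Str.split? textU keyU with
  | none => none  -- keyword = "": Python raises ValueError here (excluded by Pre_)
  | some text_pieces =>
    if text_pieces.length = 1 then none
    else
      let split_words := text_pieces.map PySem.Str.split₀
      some ((PySem.List.pyRange 0 ((split_words.length : Int) - 1) 1).foldl
        (fun occurences index =>
          let sw := PySem.List.pyGetD split_words index []
          let left_words := PySem.List.slice sw (some ((sw.length : Int) - left)) none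
          let right_words := PySem.List.slice (PySem.List.pyGetD split_words (index + 1) []) (some 0) (some right)
          occurences ++ [PySem.Str.join " " (left_words ++ [keyU] ++ right_words)])
        [])

-- ===== PORT B =====
-- the `while True` loop of Source B; fuel only makes the recursion structural (it is never
-- exhausted for fuel > len(rest), as the proofs show)
def nwGo (k : String) (l r : Int) : Nat → String → String → List String → List String
  | 0, _prev, _rest, acc => acc
  | fuel + 1, prev, rest, acc =>
    let j := PySem.Str.find rest k
    let nxt := if j = -1 then rest else PySem.Str.slice rest none (some j)
    let lw0 := PySem.Str.split₀ prev
    let left_words := PySem.List.slice lw0 (some ((lw0.length : Int) - l)) none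
    let right_words := PySem.List.slice (PySem.Str.split₀ nxt) (some 0) (some r)
    let acc' := acc ++ [PySem.Str.join " " (left_words ++ [k] ++ right_words)]
    if j = -1 then acc'
    else nwGo k l r fuel nxt (PySem.Str.slice rest (some (j + PySem.Str.len k)) none) acc'

def neighbourhood_words_alt (keyword : String) (text : String) (left : Int) (right : Int) : Option (List String) :=
  let textU := PySem.Str.upper text
  let keyU := PySem.Str.upper keyword
  if keyU = "" then none  -- empty keyword: Python Source B raises ValueError here (excluded by Pre_)
  else
    let i := PySem.Str.find textU keyU
    if i = -1 then none
    else some (nwGo keyU left right (textU.toList.length + 1)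
      (PySem.Str.slice textU none (some i))
      (PySem.Str.slice textU (some (i + PySem.Str.len keyU)) none) [])

-- ===== PRECONDITION & SPEC =====
-- Pre_ excludes only the empty keyword, on which Python A raises ValueError
-- (str.split('') ) and Python B raises ValueError as well.
def Pre_neighbourhood_words (keyword : String) (text : String) (left : Int) (right : Int) : Prop :=
  keyword ≠ ""
instance (keyword : String) (text : String) (left : Int) (right : Int) : Decidable (Pre_neighbourhood_words keyword text left right) := by unfold Pre_neighbourhood_words; infer_instance

def pvWitness_neighbourhood_words : String × String × Int × Int := ("ab", "xx AB yy ab zz", 1, 1)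

def Spec_neighbourhood_words (keyword : String) (text : String) (left : Int) (right : Int) (out : Option (List String)) : Prop := out = neighbourhood_words_alt keyword text left right
instance (keyword : String) (text : String) (left : Int) (right : Int) (out : Option (List String)) : Decidable (Spec_neighbourhood_words keyword text left right out) := by unfold Spec_neighbourhood_words; infer_instance

-- ===== CLAIM (what is proved, stated in full; the proofs are below) =====
def Claim_equal_neighbourhood_words : Prop := ∀ (keyword : String) (text : String) (left : Int) (right : Int), Dom_neighbourhood_words keyword text left right → Pre_neighbourhood_words keyword text left right → Spec_neighbourhood_words keyword text left right (neighbourhood_words keyword text left right)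

-- ===== LEMMAS AND PROOFS =====

-- the neighbourhood string built from the piece before an occurrence and the piece after it
def nwJoin (k : String) (l r : Int) (a b : String) : String :=
  PySem.Str.join " " (PySem.List.slice (PySem.Str.split₀ a) (some (((PySem.Str.split₀ a).length : Int) - l)) none
    ++ [k] ++ PySem.List.slice (PySem.Str.split₀ b) (some 0) (some r))

-- the neighbourhoods of all adjacent pairs of pieces
def nwPairs (k : String) (l r : Int) : List String → List String
  | a :: b :: t => nwJoin k l r a b :: nwPairs k l r (b :: t)
  | _ => []

def nwMapHead (p : List Char) : List (List Char) → List (List Char)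
  | [] => [p]
  | h :: t => (p ++ h) :: t

lemma nwMapHead_comp (p q : List Char) (xs : List (List Char)) :
    nwMapHead p (nwMapHead q xs) = nwMapHead (p ++ q) xs := by
  cases xs <;> simp [nwMapHead]

-- ---- find plumbing ----
lemma nwFindGo_bound (sub : List Char) (hsub : sub ≠ []) :
    ∀ (l : List Char) (k : Nat), PySem.Chars.find.go sub l k = -1 ∨ (k : Int) ≤ PySem.Chars.find.go sub l k := by
  intro l
  induction l with
  | nil => intro k; rw [PySem.Chars.find.go.eq_def]; simp [List.isEmpty_iff, hsub]
  | cons c t ih =>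
    intro k
    rw [PySem.Chars.find.go.eq_def]
    by_cases hp : sub.isPrefixOf (c :: t)
    · simp [hp]
    · simp only [hp, if_false, Bool.false_eq_true]
      rcases ih (k + 1) with h | h
      · left; exact h
      · right; push_cast at h ⊢; omega

lemma nwFindGo_shift (sub : List Char) (hsub : sub ≠ []) :
    ∀ (l : List Char) (k : Nat), PySem.Chars.find.go sub l k =
      if PySem.Chars.find.go sub l 0 = -1 then -1 else PySem.Chars.find.go sub l 0 + k := by
  intro l
  induction l with
  | nil =>
    intro k
    rw [PySem.Chars.find.go.eq_def, PySem.Chars.find.go.eq_def]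
    simp [List.isEmpty_iff, hsub]
  | cons c t ih =>
    intro k
    rw [PySem.Chars.find.go.eq_def, PySem.Chars.find.go.eq_def sub (c :: t) 0]
    by_cases hp : sub.isPrefixOf (c :: t)
    · simp [hp]
    · simp only [hp, if_false, Bool.false_eq_true]
      rcases nwFindGo_bound sub hsub t 0 with h0 | h0
      · rw [ih (k + 1), ih 1]
        simp [h0]
      · rw [ih (k + 1), ih 1]
        have h1 : PySem.Chars.find.go sub t 0 ≠ -1 := by omega
        simp only [h1, if_false]
        split_ifs with h2
        · omega
        · push_cast; omega

lemma nwFind_nil (sub : List Char) (hsub : sub ≠ []) : PySem.Chars.find [] sub = -1 := by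
  show PySem.Chars.find.go sub [] 0 = -1
  rw [PySem.Chars.find.go.eq_def]; simp [List.isEmpty_iff, hsub]

lemma nwFind_nonneg (sub l : List Char) (hsub : sub ≠ []) :
    PySem.Chars.find l sub = -1 ∨ 0 ≤ PySem.Chars.find l sub := by
  have := nwFindGo_bound sub hsub l 0
  simpa [PySem.Chars.find] using this

lemma nwFind_cons_pos (sub : List Char) (c : Char) (t : List Char) (hp : sub.isPrefixOf (c :: t)) :
    PySem.Chars.find (c :: t) sub = 0 := by
  show PySem.Chars.find.go sub (c :: t) 0 = 0
  rw [PySem.Chars.find.go.eq_def]; simp [hp]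

lemma nwFind_cons_neg (sub : List Char) (hsub : sub ≠ []) (c : Char) (t : List Char)
    (hp : ¬ sub.isPrefixOf (c :: t) = true) :
    PySem.Chars.find (c :: t) sub =
      if PySem.Chars.find t sub = -1 then -1 else PySem.Chars.find t sub + 1 := by
  show PySem.Chars.find.go sub (c :: t) 0 = _
  rw [PySem.Chars.find.go.eq_def]
  simp only [hp, if_false, Bool.false_eq_true]
  have := nwFindGo_shift sub hsub t 1
  simpa [PySem.Chars.find] using this

-- ---- splitOn plumbing ----
lemma nwSplitGo_ne_nil (sep : List Char) :
    ∀ (fuel : Nat) (l cur : List Char) (acc : List (List Char)),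
      PySem.Chars.splitOn.go sep fuel l cur acc ≠ [] := by
  intro fuel
  induction fuel with
  | zero => intro l cur acc; rw [PySem.Chars.splitOn.go.eq_def]; simp
  | succ fuel ih =>
    intro l cur acc
    rw [PySem.Chars.splitOn.go.eq_def]
    cases l with
    | nil => simp
    | cons c rest =>
      by_cases hp : sep.isPrefixOf (c :: rest)
      · simp only [hp, if_true]; exact ih _ _ _
      · simp only [hp, if_false, Bool.false_eq_true]; exact ih _ _ _

lemma nwSplitOn_ne_nil (l sep : List Char) : PySem.Chars.splitOn l sep ≠ [] :=
  nwSplitGo_ne_nil sep _ l [] []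

lemma nwSplitGo_main (sep : List Char) (hsep : sep ≠ []) :
    ∀ (n : Nat) (l : List Char), l.length ≤ n →
      ∀ (fuel : Nat) (cur : List Char) (acc : List (List Char)), l.length < fuel →
      PySem.Chars.splitOn.go sep fuel l cur acc
        = acc.reverse ++ nwMapHead cur.reverse (PySem.Chars.splitOn l sep) := by
  intro n
  induction n with
  | zero =>
    intro l hl fuel cur acc hf
    have hnil : l = [] := List.length_eq_zero_iff.mp (Nat.le_zero.mp hl)
    subst hnil
    obtain ⟨f, rfl⟩ : ∃ f, fuel = f + 1 := ⟨fuel - 1, by omega⟩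
    rw [PySem.Chars.splitOn.go.eq_def]
    simp [PySem.Chars.splitOn, PySem.Chars.splitOn.go.eq_def, nwMapHead]
  | succ n ih =>
    intro l hl fuel cur acc hf
    obtain ⟨f, rfl⟩ : ∃ f, fuel = f + 1 := ⟨fuel - 1, by omega⟩
    cases l with
    | nil =>
      rw [PySem.Chars.splitOn.go.eq_def]
      simp [PySem.Chars.splitOn, PySem.Chars.splitOn.go.eq_def, nwMapHead]
    | cons c rest =>
      have h1 : 1 ≤ sep.length := by
        cases sep with
        | nil => exact absurd rfl hsep
        | cons a b => simp
      rw [PySem.Chars.splitOn.go.eq_def]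
      by_cases hp : sep.isPrefixOf (c :: rest)
      · -- sep is a prefix: both sides step into drop sep.length
        simp only [hp, if_true]
        have hdl : (List.drop sep.length (c :: rest)).length ≤ n := by
          simp only [List.length_drop, List.length_cons] at *
          omega
        have hdf : (List.drop sep.length (c :: rest)).length < f := by
          simp only [List.length_drop, List.length_cons] at *
          omega
        rw [ih _ hdl f [] _ hdf]
        have hrhs : PySem.Chars.splitOn (c :: rest) sep
            = [] :: nwMapHead [] (PySem.Chars.splitOn (List.drop sep.length (c :: rest)) sep) := by
          show PySem.Chars.splitOn.go sep ((c :: rest).length + 1) (c :: rest) [] [] = _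
          rw [PySem.Chars.splitOn.go.eq_def]
          simp only [hp, if_true]
          have hdf2 : (List.drop sep.length (c :: rest)).length < (c :: rest).length := by
            simp only [List.length_drop, List.length_cons]
            omega
          rw [ih _ hdl _ [] _ hdf2]
          simp [nwMapHead]
        rw [hrhs]
        simp [nwMapHead]
      · simp only [hp, if_false, Bool.false_eq_true]
        have hrl : rest.length ≤ n := by simp at hl; omega
        have hrf : rest.length < f := by simp at hf; omega
        rw [ih _ hrl f (c :: cur) acc hrf]
        have hrhs : PySem.Chars.splitOn (c :: rest) sep = nwMapHead [c] (PySem.Chars.splitOn rest sep) := by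
          show PySem.Chars.splitOn.go sep ((c :: rest).length + 1) (c :: rest) [] [] = _
          rw [PySem.Chars.splitOn.go.eq_def]
          simp only [hp, if_false, Bool.false_eq_true]
          rw [ih _ hrl _ [c] [] (by simp)]
          simp [nwMapHead]
        rw [hrhs, List.reverse_cons, nwMapHead_comp]

lemma nwSplitOn_nil (sep : List Char) : PySem.Chars.splitOn [] sep = [[]] := by
  show PySem.Chars.splitOn.go sep 1 [] [] [] = [[]]
  rw [PySem.Chars.splitOn.go.eq_def]
  simp

lemma nwSplitOn_cons_pos (sep : List Char) (hsep : sep ≠ []) (c : Char) (rest : List Char)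
    (hp : sep.isPrefixOf (c :: rest)) :
    PySem.Chars.splitOn (c :: rest) sep = [] :: PySem.Chars.splitOn (List.drop sep.length (c :: rest)) sep := by
  have h1 : 1 ≤ sep.length := by
    cases sep with
    | nil => exact absurd rfl hsep
    | cons a b => simp
  show PySem.Chars.splitOn.go sep ((c :: rest).length + 1) (c :: rest) [] [] = _
  rw [PySem.Chars.splitOn.go.eq_def]
  simp only [hp, if_true]
  have hdf : (List.drop sep.length (c :: rest)).length < (c :: rest).length := by
    simp only [List.length_drop, List.length_cons]; omega
  rw [nwSplitGo_main sep hsep _ _ (le_refl _) _ [] _ hdf]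
  cases hX : PySem.Chars.splitOn (List.drop sep.length (c :: rest)) sep with
  | nil => exact absurd hX (nwSplitOn_ne_nil _ _)
  | cons h t => simp [nwMapHead]

lemma nwSplitOn_cons_neg (sep : List Char) (hsep : sep ≠ []) (c : Char) (rest : List Char)
    (hp : ¬ sep.isPrefixOf (c :: rest) = true) :
    PySem.Chars.splitOn (c :: rest) sep = nwMapHead [c] (PySem.Chars.splitOn rest sep) := by
  show PySem.Chars.splitOn.go sep ((c :: rest).length + 1) (c :: rest) [] [] = _
  rw [PySem.Chars.splitOn.go.eq_def]
  simp only [hp, if_false, Bool.false_eq_true]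
  rw [nwSplitGo_main sep hsep rest.length rest (le_refl _) _ [c] [] (by simp)]
  simp [nwMapHead]

-- the characterisation of str.split(sep) by the first occurrence (sep ≠ '')
lemma nwSplitOn_unfold (sep : List Char) (hsep : sep ≠ []) :
    ∀ (l : List Char),
      PySem.Chars.splitOn l sep =
        if PySem.Chars.find l sep = -1 then [l]
        else List.take (PySem.Chars.find l sep).toNat l
          :: PySem.Chars.splitOn (List.drop ((PySem.Chars.find l sep).toNat + sep.length) l) sep := by
  have main : ∀ (n : Nat) (l : List Char), l.length ≤ n →
      PySem.Chars.splitOn l sep =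
        if PySem.Chars.find l sep = -1 then [l]
        else List.take (PySem.Chars.find l sep).toNat l
          :: PySem.Chars.splitOn (List.drop ((PySem.Chars.find l sep).toNat + sep.length) l) sep := by
    intro n
    induction n with
    | zero =>
      intro l hl
      have hnil : l = [] := List.length_eq_zero_iff.mp (Nat.le_zero.mp hl)
      subst hnil
      rw [nwFind_nil sep hsep]
      simp [nwSplitOn_nil]
    | succ n ih =>
      intro l hl
      cases l with
      | nil =>
        rw [nwFind_nil sep hsep]
        simp [nwSplitOn_nil]
      | cons c rest =>
        by_cases hp : sep.isPrefixOf (c :: rest)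
        · rw [nwFind_cons_pos sep c rest hp, nwSplitOn_cons_pos sep hsep c rest hp]
          norm_num
        · rw [nwFind_cons_neg sep hsep c rest hp, nwSplitOn_cons_neg sep hsep c rest hp]
          rw [ih rest (by simp only [List.length_cons] at hl; omega)]
          rcases nwFind_nonneg sep rest hsep with h0 | h0
          · simp [h0, nwMapHead]
          · have hne : PySem.Chars.find rest sep ≠ -1 := by omega
            simp only [hne, if_false]
            have ht : (PySem.Chars.find rest sep + 1).toNat = (PySem.Chars.find rest sep).toNat + 1 := by omega
            have hpush : ¬ (PySem.Chars.find rest sep + 1 = -1) := by omega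
            rw [if_neg hpush]
            simp only [nwMapHead, ht]
            have hd : (PySem.Chars.find rest sep).toNat + 1 + sep.length
                = ((PySem.Chars.find rest sep).toNat + sep.length) + 1 := by omega
            rw [hd, List.drop_succ_cons]
            simp
  intro l; exact main l.length l (le_refl _)

-- ---- B's loop computes the adjacent-pair neighbourhoods of the remaining pieces ----
lemma nwB_loop (k : String) (hk : k.toList ≠ []) (l r : Int) :
    ∀ (fuel : Nat) (prev rest : String) (acc : List String), rest.toList.length < fuel →
      nwGo k l r fuel prev rest acc
        = acc ++ nwPairs k l r (prev :: (PySem.Chars.splitOn rest.toList k.toList).map String.ofList) := by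
  intro fuel
  induction fuel with
  | zero => intro prev rest acc h; omega
  | succ fuel ih =>
    intro prev rest acc hlen
    rw [nwSplitOn_unfold k.toList hk rest.toList]
    have hje : PySem.Str.find rest k = PySem.Chars.find rest.toList k.toList := rfl
    by_cases hj : PySem.Str.find rest k = -1
    · rw [← hje]
      simp only [nwGo, hj, if_true, if_pos]
      simp [nwPairs, nwJoin, String.ofList_toList]
    · have hj' : PySem.Chars.find rest.toList k.toList ≠ -1 := by rwa [hje] at hj
      have hj0 : (0 : Int) ≤ PySem.Str.find rest k := by
        rcases nwFind_nonneg k.toList rest.toList hk with h | h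
        · exact absurd h hj'
        · rwa [hje]
      rw [← hje]
      simp only [nwGo, hj, if_false]
      have hnxt : PySem.Str.slice rest none (some (PySem.Str.find rest k))
          = String.ofList (rest.toList.take (PySem.Str.find rest k).toNat) := by
        have h1 : (PySem.Str.slice rest none (some (PySem.Str.find rest k))).toList
            = rest.toList.take (PySem.Str.find rest k).toNat := by
          simp only [PySem.Str.toList_slice, PySem.Chars.slice_eq_listSlice]
          exact PySem.List.slice_to _ hj0
        rw [← h1, String.ofList_toList]
      have hrest : (PySem.Str.slice rest (some (PySem.Str.find rest k + PySem.Str.len k)) none).toList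
          = rest.toList.drop ((PySem.Str.find rest k).toNat + k.toList.length) := by
        simp only [PySem.Str.toList_slice, PySem.Chars.slice_eq_listSlice]
        rw [PySem.List.slice_from _ (by
          have : (0:Int) ≤ PySem.Str.len k := by simp [PySem.Str.len]
          omega)]
        congr 1
        simp [PySem.Str.len]
        omega
      have hrne : rest.toList ≠ [] := by
        intro h0
        rw [hje, h0] at hj
        exact hj (nwFind_nil k.toList hk)
      have hk1 : 1 ≤ k.toList.length := by
        cases hkl : k.toList with
        | nil => exact absurd hkl hk
        | cons a b => simp
      have hflen : (PySem.Str.slice rest (some (PySem.Str.find rest k + PySem.Str.len k)) none).toList.length < fuel := by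
        rw [hrest, List.length_drop]
        have : 1 ≤ rest.toList.length := by
          cases hr : rest.toList with
          | nil => exact absurd hr hrne
          | cons a b => simp
        omega
      rw [ih _ _ _ hflen, hrest]
      rw [hje] at hnxt ⊢
      rw [hnxt]
      simp only [List.map_cons, nwPairs]
      rw [List.append_assoc]
      rfl

-- ---- A's index loop over the piece list is the same adjacent-pair map ----
lemma nwSplit₀_empty : PySem.Str.split₀ "" = [] := by decide

lemma nwGetD_map_split₀ (ps : List String) (n : Nat) :
    (ps.map PySem.Str.split₀).getD n [] = PySem.Str.split₀ (ps.getD n "") := by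
  induction ps generalizing n with
  | nil => simp [nwSplit₀_empty]
  | cons a t ih =>
    cases n with
    | zero => simp
    | succ m => simpa using ih m

lemma nwA_nat (k : String) (l r : Int) :
    ∀ (ps : List String),
      (List.range (ps.length - 1)).map
        (fun kk => nwJoin k l r (ps.getD kk "") (ps.getD (kk + 1) "")) = nwPairs k l r ps := by
  intro ps
  induction ps with
  | nil => simp [nwPairs]
  | cons a t ih =>
    cases t with
    | nil => simp [nwPairs]
    | cons b t2 =>
      rw [show (a :: b :: t2).length - 1 = t2.length + 1 from by simp]
      rw [List.range_succ_eq_map, List.map_cons, List.map_map]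
      have hcomp : ((fun kk => nwJoin k l r ((a :: b :: t2).getD kk "") ((a :: b :: t2).getD (kk + 1) "")) ∘ Nat.succ)
          = fun kk => nwJoin k l r ((b :: t2).getD kk "") ((b :: t2).getD (kk + 1) "") := by
        funext kk
        simp [Function.comp, List.getD_cons_succ]
      rw [hcomp]
      have ih' := ih
      simp only [List.length_cons, Nat.add_sub_cancel] at ih'
      rw [ih']
      simp [nwPairs]

lemma nwA_loop (k : String) (l r : Int) (ps : List String) :
    (PySem.List.pyRange 0 (((ps.map PySem.Str.split₀).length : Int) - 1) 1).foldl
      (fun occurences index =>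
        occurences ++ [PySem.Str.join " "
          (PySem.List.slice (PySem.List.pyGetD (ps.map PySem.Str.split₀) index [])
              (some (((PySem.List.pyGetD (ps.map PySem.Str.split₀) index []).length : Int) - l)) none
            ++ [k]
            ++ PySem.List.slice (PySem.List.pyGetD (ps.map PySem.Str.split₀) (index + 1) []) (some 0) (some r))])
      [] = nwPairs k l r ps := by
  rw [PySem.List.foldl_append_singleton_eq_map]
  rw [PySem.List.pyRange_one]
  rw [List.map_map]
  have hn : ((((ps.map PySem.Str.split₀).length : Int) - 1) - 0).toNat = ps.length - 1 := by
    simp only [List.length_map]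
    omega
  rw [hn]
  rw [List.nil_append]
  have hfun : ((fun index => PySem.Str.join " "
          (PySem.List.slice (PySem.List.pyGetD (ps.map PySem.Str.split₀) index [])
              (some (((PySem.List.pyGetD (ps.map PySem.Str.split₀) index []).length : Int) - l)) none
            ++ [k]
            ++ PySem.List.slice (PySem.List.pyGetD (ps.map PySem.Str.split₀) (index + 1) []) (some 0) (some r)))
        ∘ (fun kk : Nat => (0 : Int) + kk))
      = fun kk : Nat => nwJoin k l r (ps.getD kk "") (ps.getD (kk + 1) "") := by
    funext kk
    have h1 : ((0 : Int) + kk) = ((kk : Nat) : Int) := by push_cast; ring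
    have h2 : ((kk : Nat) : Int) + 1 = (((kk + 1 : Nat)) : Int) := by push_cast; ring
    simp only [Function.comp, h1, h2, PySem.List.pyGetD_natCast, nwGetD_map_split₀]
    rfl
  rw [hfun, nwA_nat]

-- ===== VERDICT (by name: the statement is the Claim_ definition above) =====
set_option maxHeartbeats 1600000 in
theorem neighbourhood_words_spec : Claim_equal_neighbourhood_words := by
  intro keyword text left right hdom hpre
  unfold Spec_neighbourhood_words
  have hkw : keyword.toList ≠ [] := by
    intro h
    exact hpre (by rw [← String.ofList_toList (s := keyword), h])
  have hkl : (PySem.Str.upper keyword).toList ≠ [] := by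
    rw [PySem.Str.toList_upper]
    simp only [PySem.Chars.upper, ne_eq, List.map_eq_nil_iff]
    exact hkw
  have hkeyU : ¬ (PySem.Str.upper keyword = "") := by
    intro h
    apply hkl
    rw [h]
    rfl
  have hsplit : PySem.Str.split? (PySem.Str.upper text) (PySem.Str.upper keyword)
      = some ((PySem.Chars.splitOn (PySem.Str.upper text).toList (PySem.Str.upper keyword).toList).map String.ofList) := by
    simp only [PySem.Str.split?, PySem.Chars.split?]
    rw [if_neg (by simp only [List.isEmpty_iff]; exact hkl)]
    rfl
  have hunf := nwSplitOn_unfold (PySem.Str.upper keyword).toList hkl (PySem.Str.upper text).toList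
  by_cases hfind : PySem.Chars.find (PySem.Str.upper text).toList (PySem.Str.upper keyword).toList = -1
  · -- keyword absent: both return none
    rw [if_pos hfind] at hunf
    have hlen1 : ((PySem.Chars.splitOn (PySem.Str.upper text).toList (PySem.Str.upper keyword).toList).map String.ofList).length = 1 := by
      rw [hunf]; rfl
    have hi : PySem.Str.find (PySem.Str.upper text) (PySem.Str.upper keyword) = -1 := hfind
    simp only [neighbourhood_words, neighbourhood_words_alt, hsplit]
    rw [if_pos hlen1, if_neg hkeyU, if_pos hi]
  · rw [if_neg hfind] at hunf
    have hi0 : (0 : Int) ≤ PySem.Chars.find (PySem.Str.upper text).toList (PySem.Str.upper keyword).toList := by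
      rcases nwFind_nonneg (PySem.Str.upper keyword).toList (PySem.Str.upper text).toList hkl with h | h
      · exact absurd h hfind
      · exact h
    have hlen2 : ¬ (((PySem.Chars.splitOn (PySem.Str.upper text).toList (PySem.Str.upper keyword).toList).map String.ofList).length = 1) := by
      rw [hunf]
      have hne := nwSplitOn_ne_nil (List.drop ((PySem.Chars.find (PySem.Str.upper text).toList (PySem.Str.upper keyword).toList).toNat + (PySem.Str.upper keyword).toList.length) (PySem.Str.upper text).toList) (PySem.Str.upper keyword).toList
      cases hX : PySem.Chars.splitOn (List.drop ((PySem.Chars.find (PySem.Str.upper text).toList (PySem.Str.upper keyword).toList).toNat + (PySem.Str.upper keyword).toList.length) (PySem.Str.upper text).toList) (PySem.Str.upper keyword).toList with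
      | nil => exact absurd hX hne
      | cons h t => simp [hX]
    have hie : ¬ (PySem.Str.find (PySem.Str.upper text) (PySem.Str.upper keyword) = -1) := hfind
    simp only [neighbourhood_words, neighbourhood_words_alt, hsplit]
    rw [if_neg hlen2, if_neg hkeyU, if_neg hie]
    rw [nwA_loop]
    have hprev : PySem.Str.slice (PySem.Str.upper text) none (some (PySem.Str.find (PySem.Str.upper text) (PySem.Str.upper keyword)))
        = String.ofList ((PySem.Str.upper text).toList.take (PySem.Chars.find (PySem.Str.upper text).toList (PySem.Str.upper keyword).toList).toNat) := by
      have h1 : (PySem.Str.slice (PySem.Str.upper text) none (some (PySem.Str.find (PySem.Str.upper text) (PySem.Str.upper keyword)))).toList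
          = (PySem.Str.upper text).toList.take (PySem.Chars.find (PySem.Str.upper text).toList (PySem.Str.upper keyword).toList).toNat := by
        simp only [PySem.Str.toList_slice, PySem.Chars.slice_eq_listSlice]
        exact PySem.List.slice_to _ hi0
      rw [← h1, String.ofList_toList]
    have hrest : (PySem.Str.slice (PySem.Str.upper text) (some (PySem.Str.find (PySem.Str.upper text) (PySem.Str.upper keyword) + PySem.Str.len (PySem.Str.upper keyword))) none).toList
        = (PySem.Str.upper text).toList.drop ((PySem.Chars.find (PySem.Str.upper text).toList (PySem.Str.upper keyword).toList).toNat + (PySem.Str.upper keyword).toList.length) := by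
      simp only [PySem.Str.toList_slice, PySem.Chars.slice_eq_listSlice]
      rw [PySem.List.slice_from _ (by
        have h2 : (0:Int) ≤ PySem.Str.len (PySem.Str.upper keyword) := by
          simp [PySem.Str.len]
        have h3 : (0:Int) ≤ PySem.Str.find (PySem.Str.upper text) (PySem.Str.upper keyword) := hi0
        omega)]
      congr 1
      have h2 : PySem.Str.len (PySem.Str.upper keyword) = ((PySem.Str.upper keyword).toList.length : Int) := rfl
      rw [h2, PySem.Str.find_eq]
      omega
    have hflen : (PySem.Str.slice (PySem.Str.upper text) (some (PySem.Str.find (PySem.Str.upper text) (PySem.Str.upper keyword) + PySem.Str.len (PySem.Str.upper keyword))) none).toList.length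
        < (PySem.Str.upper text).toList.length + 1 := by
      rw [hrest, List.length_drop]
      omega
    rw [nwB_loop (PySem.Str.upper keyword) hkl left right _ _ _ [] hflen]
    rw [hrest, hprev, hunf]
    simp only [List.map_cons, List.nil_append]
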